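-- pv_equiv track=rewrite | github.com/cfevrius/CodingBat | source/array3.py | square_up
-- ===== SOURCE A (Python) =====
-- def square_up(n):
--     def create_group(num, group_size):
--         zeroes = [0] * (group_size - num)
--         nums   = range(1, num + 1)
--         return zeroes + list(reversed(nums))
--     group_of_groups = [create_group(i , n) for i in range(1, n+1)]
--     flattened_groups = [item for group in group_of_groups for item in group]
--     return flattened_groups
-- ===== SOURCE B (Python) =====
-- def square_up(n):
--     return [n - c if i + c >= n else 0 for i in range(1, n + 1) for c in range(n)]
-- ===== Notes on version B (the rewrite author's own statement) =====
-- stated objective: simpler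
-- what changed: Replaces the per-row construction (zero-prefix list + reversed range, then a separate flattening pass) by a single nested comprehension that emits each element directly from position arithmetic (n-c if i+c>=n else 0).
import Mathlib
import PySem

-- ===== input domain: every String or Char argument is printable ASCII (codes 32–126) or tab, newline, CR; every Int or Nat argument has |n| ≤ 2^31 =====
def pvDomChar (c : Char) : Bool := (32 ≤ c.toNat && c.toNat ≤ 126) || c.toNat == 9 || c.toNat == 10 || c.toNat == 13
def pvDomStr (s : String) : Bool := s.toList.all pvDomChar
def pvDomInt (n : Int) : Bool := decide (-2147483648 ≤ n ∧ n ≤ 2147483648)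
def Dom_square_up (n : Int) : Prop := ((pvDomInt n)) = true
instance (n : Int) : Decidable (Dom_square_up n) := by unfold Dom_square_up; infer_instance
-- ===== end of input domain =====

-- B emits each element directly by position arithmetic in one nested comprehension instead of
-- building per-row zero-prefix lists plus reversed ranges and flattening them; equal cost, simpler.

-- ===== PORT A =====
def createGroup (num groupSize : Int) : List Int :=
  -- zeroes = [0] * (group_size - num);  list(reversed(range(1, num+1)))
  List.replicate (groupSize - num).toNat 0 ++ (PySem.List.pyRange 1 (num + 1) 1).reverse

def square_up (n : Int) : List Int :=
  -- group_of_groups = [create_group(i, n) for i in range(1, n+1)]; then flatten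
  (((PySem.List.pyRange 1 (n + 1) 1).map (fun i => createGroup i n)).flatten)

-- ===== PORT B =====
def square_up_alt (n : Int) : List Int :=
  (PySem.List.pyRange 1 (n + 1) 1).flatMap
    (fun i => (PySem.List.pyRange 0 n 1).map (fun c => if n ≤ i + c then n - c else 0))

-- ===== PRECONDITION & SPEC =====
def Spec_square_up (n : Int) (out : List Int) : Prop := out = square_up_alt n
instance (n : Int) (out : List Int) : Decidable (Spec_square_up n out) := by unfold Spec_square_up; infer_instance

-- ===== CLAIM (what is proved, stated in full; the proofs are below) =====
def Claim_equal_square_up : Prop := ∀ (n : Int), Dom_square_up n → Spec_square_up n (square_up n)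

-- ===== LEMMAS AND PROOFS =====

-- one row: A's zero-prefix ++ reversed range equals B's arithmetic row, for 1 ≤ i ≤ n
theorem row_eq (n i : Int) (h1 : 1 ≤ i) (h2 : i ≤ n) :
    createGroup i n
      = (PySem.List.pyRange 0 n 1).map (fun c => if n ≤ i + c then n - c else 0) := by
  unfold createGroup
  rw [PySem.List.pyRange_one_append 0 (n - i) n (by omega) (by omega), List.map_append]
  congr 1
  · -- zero prefix
    rw [PySem.List.pyRange_one]
    rw [List.map_map]
    symm
    rw [List.eq_replicate_iff]
    refine ⟨by simp, ?_⟩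
    intro b hb
    simp only [List.mem_map, List.mem_range, Function.comp_apply] at hb
    obtain ⟨k, hk, hkb⟩ := hb
    have hc : ¬ n ≤ i + (0 + (k : Int)) := by omega
    rw [if_neg hc] at hkb
    exact hkb.symm
  · -- reversed 1..i equals map (n - c) over n-i..n: compare elementwise
    apply List.ext_getElem
    · simp [PySem.List.length_pyRange_one]
    intro k hk1 hk2
    have hki : k < (i + 1 - 1).toNat := by
      simpa [PySem.List.length_pyRange_one] using hk1
    simp only [List.getElem_reverse, List.getElem_map, PySem.List.getElem_pyRange_one,
      PySem.List.length_pyRange_one]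
    have hcond : n ≤ i + (n - i + (k : Int)) := by omega
    rw [if_pos hcond]
    omega

-- ===== VERDICT (by name: the statement is the Claim_ definition above) =====
theorem square_up_spec : Claim_equal_square_up := by
  intro n _
  unfold Spec_square_up square_up square_up_alt
  rw [List.flatten_eq_flatMap, List.flatMap_map]
  apply List.flatMap_congr
  intro i hi
  rw [PySem.List.mem_pyRange_one] at hi
  exact row_eq n i hi.1 (by omega)
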